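-- pv_equiv track=rewrite | github.com/xiaobingling93-pixel/Ascend-msprobe | python/msprobe/infer/offline/compare/utils/torch_dump_reader.py | _extract_key_from_fx_node
-- ===== SOURCE A (Python) =====
-- from typing import Optional
--
-- def _extract_key_from_fx_node(fx_node: str) -> Optional[str]:
--     #fx_node示例: "/layer1/0/relu/relu_1"
--     fx_node = fx_node.split("/")
--     if len(fx_node) < 3:
--         return None
--     fx_node = fx_node[1:-1]
--     # 对每个node处理, 去除下划线分隔
--     fx_node = [node.replace('_', '.') for node in fx_node]
--
--     #模型经过fxGraph->export->compile后，dump下来的downsample算子在映射表中多一个下划线后缀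
--     cpu_key = ".".join(fx_node).strip('_')
--     return cpu_key
-- ===== SOURCE B (Python) =====
-- from typing import Optional
--
-- def _extract_key_from_fx_node(fx_node: str) -> Optional[str]:
--     # Single left-to-right scan: commit chars between slashes, no split list.
--     res = []          # committed output chars (each inner segment followed by '.')
--     buf = []          # chars seen since the last '/'
--     seen = False      # a '/' has been seen
--     for ch in fx_node:
--         if ch == '/':
--             if seen:
--                 res.extend(buf)
--                 res.append('.')
--             seen = True
--             buf = []
--         else:
--             buf.append('.' if ch == '_' else ch)
--     if not res:
--         return None
--     return ''.join(res[:-1])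
-- ===== Notes on version B (the rewrite author's own statement) =====
-- stated objective: alternative
-- what changed: Replaces the split('/')/slice/comprehension/join/strip pipeline by a single left-to-right character scan that commits inner-segment characters (with '_' mapped to '.') into an accumulator and drops the trailing separator at the end.
import Mathlib
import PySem

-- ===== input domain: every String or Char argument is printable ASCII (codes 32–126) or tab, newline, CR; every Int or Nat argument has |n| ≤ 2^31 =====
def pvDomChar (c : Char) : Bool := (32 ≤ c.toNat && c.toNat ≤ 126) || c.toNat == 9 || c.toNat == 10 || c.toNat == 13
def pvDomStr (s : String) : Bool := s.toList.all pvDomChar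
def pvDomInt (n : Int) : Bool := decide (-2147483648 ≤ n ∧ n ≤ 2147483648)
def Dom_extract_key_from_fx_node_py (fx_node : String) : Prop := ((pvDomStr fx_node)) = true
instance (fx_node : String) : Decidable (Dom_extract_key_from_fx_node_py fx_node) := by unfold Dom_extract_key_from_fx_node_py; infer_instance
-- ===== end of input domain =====

-- B replaces A's split('/')/slice/comprehension/join/strip pipeline by a single left-to-right
-- character scan with committed-output and pending-buffer accumulators (objective: alternative).

-- ===== PORT A =====
-- literal transliteration of A: split on "/", length guard, slice [1:-1], per-segment
-- replace('_','.'), join with ".", strip('_'); strings handled on .toList (PySem.Chars are the definitions)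
def extract_key_from_fx_node_py (fx_node : String) : Option String :=
  let parts := PySem.Chars.splitOn fx_node.toList ['/']
  if parts.length < 3 then none
  else
    let mid := PySem.List.slice parts (some 1) (some (-1))
    let mapped := mid.map (fun node => PySem.Chars.replace node ['_'] ['.'])
    some (String.ofList (PySem.Chars.stripChars (PySem.Chars.join ['.'] mapped) ['_']))

-- ===== PORT B =====
-- B's loop body: state (res = committed output, buf = chars since last '/', seen = a '/' was seen)
def pvStep (st : List Char × List Char × Bool) (ch : Char) : List Char × List Char × Bool :=
  if ch = '/' then
    ((if st.2.2 then st.1 ++ st.2.1 ++ ['.'] else st.1), [], true)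
  else
    (st.1, st.2.1 ++ [if ch = '_' then '.' else ch], st.2.2)

def extract_key_from_fx_node_py_alt (fx_node : String) : Option String :=
  let st := fx_node.toList.foldl pvStep ([], [], false)
  if st.1 = [] then none else some (String.ofList st.1.dropLast)

-- ===== PRECONDITION & SPEC =====
def Spec_extract_key_from_fx_node_py (fx_node : String) (out : Option String) : Prop := out = extract_key_from_fx_node_py_alt fx_node
instance (fx_node : String) (out : Option String) : Decidable (Spec_extract_key_from_fx_node_py fx_node out) := by unfold Spec_extract_key_from_fx_node_py; infer_instance

-- ===== CLAIM (what is proved, stated in full; the proofs are below) =====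
def Claim_equal_extract_key_from_fx_node_py : Prop := ∀ (fx_node : String), Dom_extract_key_from_fx_node_py fx_node → Spec_extract_key_from_fx_node_py fx_node (extract_key_from_fx_node_py fx_node)

-- ===== LEMMAS AND PROOFS =====

-- proof-side helpers: the character substitution and a structural split on '/'
def pvF (c : Char) : Char := if c = '_' then '.' else c

def pvSplit : List Char → List (List Char)
  | [] => [[]]
  | c :: t => if c = '/' then [] :: pvSplit t else (pvSplit t).modifyHead (c :: ·)

theorem pvSplit_ne_nil (l : List Char) : pvSplit l ≠ [] := by
  induction l with
  | nil => simp [pvSplit]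
  | cons c t ih =>
    simp only [pvSplit]; split
    · simp
    · rcases h : pvSplit t with _ | ⟨a, r⟩
      · exact absurd h ih
      · simp

theorem pvSplitOn_go_spec (fuel : Nat) : ∀ (l cur : List Char) (accs : List (List Char)),
    l.length ≤ fuel →
    PySem.Chars.splitOn.go ['/'] fuel l cur accs = accs.reverse ++ (pvSplit l).modifyHead (cur.reverse ++ ·) := by
  induction fuel with
  | zero =>
    intro l cur accs h
    have : l = [] := by cases l <;> simp_all
    subst this
    simp [PySem.Chars.splitOn.go, pvSplit]
  | succ n ih =>
    intro l cur accs h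
    cases l with
    | nil => simp [PySem.Chars.splitOn.go, pvSplit]
    | cons c t =>
      by_cases hc : c = '/'
      · subst hc
        rw [PySem.Chars.splitOn.go]
        simp only [List.isPrefixOf, List.length] at *
        simp [pvSplit]
        rw [ih t [] (List.reverse cur :: accs) (by simpa using Nat.le_of_succ_le_succ h)]
        simp
        cases pvSplit t <;> simp
      · rw [PySem.Chars.splitOn.go]
        have hpre : List.isPrefixOf ['/'] (c :: t) = false := by
          simp [List.isPrefixOf]; exact fun hh => absurd hh.symm hc
        simp [hpre]
        rw [ih t (c :: cur) accs (by simpa using Nat.le_of_succ_le_succ h)]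
        simp [pvSplit, hc]
        rcases hs : pvSplit t with _ | ⟨a, r⟩
        · exact absurd hs (pvSplit_ne_nil t)
        · simp

theorem pvSplitOn_spec (cs : List Char) : PySem.Chars.splitOn cs ['/'] = pvSplit cs := by
  rw [PySem.Chars.splitOn, pvSplitOn_go_spec (cs.length + 1) cs [] [] (by omega)]
  cases pvSplit cs <;> simp

theorem pvReplace_go_spec (fuel : Nat) : ∀ (l acc : List Char),
    l.length ≤ fuel →
    PySem.Chars.replace.go ['_'] ['.'] fuel l acc = acc.reverse ++ l.map pvF := by
  induction fuel with
  | zero =>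
    intro l acc h
    have : l = [] := by cases l <;> simp_all
    subst this
    simp [PySem.Chars.replace.go]
  | succ n ih =>
    intro l acc h
    cases l with
    | nil => simp [PySem.Chars.replace.go]
    | cons c t =>
      by_cases hc : c = '_'
      · subst hc
        rw [PySem.Chars.replace.go]
        simp [List.isPrefixOf]
        rw [ih t ('.' :: acc) (by simpa using Nat.le_of_succ_le_succ h)]
        simp [pvF]
      · rw [PySem.Chars.replace.go]
        have hpre : List.isPrefixOf ['_'] (c :: t) = false := by
          simp [List.isPrefixOf]; exact fun hh => absurd hh.symm hc
        simp [hpre]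
        rw [ih t (c :: acc) (by simpa using Nat.le_of_succ_le_succ h)]
        simp [pvF, hc]

theorem pvReplace_spec (l : List Char) : PySem.Chars.replace l ['_'] ['.'] = l.map pvF := by
  rw [PySem.Chars.replace]
  simp [List.isEmpty]
  rw [pvReplace_go_spec l.length l [] (le_refl _)]
  simp

theorem pvStrip_id (s : List Char) (h : '_' ∉ s) : PySem.Chars.stripChars s ['_'] = s := by
  rw [PySem.Chars.stripChars]
  have key : ∀ (t : List Char), '_' ∉ t → List.dropWhile (fun c => [('_':Char)].contains c) t = t := by
    intro t ht
    rw [List.dropWhile_eq_self_iff]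
    intro hne
    simp only [List.contains_cons, List.contains_nil, Bool.or_false, beq_iff_eq]
    intro hh
    exact ht (by rw [← hh]; exact List.getElem_mem hne)
  rw [key s h, key s.reverse (by simpa using h), List.reverse_reverse]

theorem pvFlat_eq_nil_iff (ms : List (List Char)) : ms.flatMap (· ++ ['.']) = [] ↔ ms = [] := by
  cases ms <;> simp

theorem pvFlat_dropLast (ms : List (List Char)) (h : ms ≠ []) :
    (ms.flatMap (· ++ ['.'])).dropLast = List.intercalate ['.'] ms := by
  induction ms with
  | nil => exact absurd rfl h
  | cons m rest ih =>
    cases rest with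
    | nil => simp [List.intercalate]
    | cons m2 r2 =>
      have hne : (m2 :: r2).flatMap (· ++ ['.']) ≠ [] := by
        rw [ne_eq, pvFlat_eq_nil_iff]; simp
      rw [List.flatMap_cons, List.dropLast_append_of_ne_nil hne, ih (by simp)]
      simp [List.intercalate]

theorem pvFoldl_true (cs : List Char) : ∀ (res buf : List Char),
    (cs.foldl pvStep (res, buf, true)).1 =
      res ++ (((buf ++ (pvSplit cs).headI.map pvF) :: (pvSplit cs).tail.map (List.map pvF)).dropLast).flatMap (· ++ ['.']) := by
  induction cs with
  | nil => intro res buf; simp [pvSplit]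
  | cons c t ih =>
    intro res buf
    rcases hs : pvSplit t with _ | ⟨a, r⟩
    · exact absurd hs (pvSplit_ne_nil t)
    by_cases hc : c = '/'
    · subst hc
      rw [List.foldl_cons]
      simp only [pvStep, if_true]
      rw [ih (res ++ buf ++ ['.']) []]
      simp [pvSplit, hs, List.dropLast_cons_of_ne_nil]
    · rw [List.foldl_cons]
      simp only [pvStep, if_neg hc]
      rw [ih res (buf ++ [if c = '_' then '.' else c])]
      simp [pvSplit, hc, hs, pvF]

theorem pvFoldl_false (cs : List Char) : ∀ (res buf : List Char),
    (cs.foldl pvStep (res, buf, false)).1 =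
      res ++ (((pvSplit cs).tail.map (List.map pvF)).dropLast).flatMap (· ++ ['.']) := by
  induction cs with
  | nil => intro res buf; simp [pvSplit]
  | cons c t ih =>
    intro res buf
    rcases hs : pvSplit t with _ | ⟨a, r⟩
    · exact absurd hs (pvSplit_ne_nil t)
    by_cases hc : c = '/'
    · subst hc
      rw [List.foldl_cons]
      simp only [pvStep, Bool.false_eq_true, ite_false, ite_true]
      rw [pvFoldl_true t res []]
      simp [pvSplit, hs]
    · rw [List.foldl_cons]
      simp only [pvStep, if_neg hc]
      rw [ih res (buf ++ [if c = '_' then '.' else c])]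
      simp [pvSplit, hc, hs]

theorem pvSlice_mid (l : List (List Char)) : PySem.List.slice l (some 1) (some (-1)) = (l.drop 1).dropLast := by
  simp [PySem.List.slice, PySem.List.clampIdx]
  rcases l with _|⟨a,t⟩
  · simp
  · simp [List.dropLast_eq_take]

theorem pvFinal (fx_node : String) :
    extract_key_from_fx_node_py fx_node = extract_key_from_fx_node_py_alt fx_node := by
  simp only [extract_key_from_fx_node_py, extract_key_from_fx_node_py_alt, pvSplitOn_spec,
    pvSlice_mid]
  rw [pvFoldl_false fx_node.toList [] []]
  set cs := fx_node.toList with hcs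
  set parts := pvSplit cs with hparts
  simp only [List.nil_append]
  have hdrop : parts.drop 1 = parts.tail := List.drop_one
  by_cases hlen : parts.length < 3
  · rw [if_pos hlen, if_pos]
    rw [pvFlat_eq_nil_iff]
    rw [← List.map_dropLast]
    have : parts.tail.dropLast = [] := by
      rcases h : parts.tail.dropLast with _ | ⟨a, r⟩
      · rfl
      · exfalso
        have h2 : parts.tail.dropLast.length ≤ parts.length - 2 := by
          simp [List.length_dropLast, List.length_tail]
          omega
        rw [h] at h2; simp at h2; omega
    rw [this]; simp
  · rw [if_neg hlen]
    have hlen3 : 3 ≤ parts.length := by omega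
    have hmsne : parts.tail.dropLast ≠ [] := by
      intro h
      have : parts.tail.dropLast.length = 0 := by rw [h]; rfl
      rw [List.length_dropLast, List.length_tail] at this; omega
    have hne2 : ((parts.tail.map (List.map pvF)).dropLast).flatMap (· ++ ['.']) ≠ [] := by
      rw [ne_eq, pvFlat_eq_nil_iff, ← List.map_dropLast]
      simp only [List.map_eq_nil_iff]
      exact hmsne
    rw [if_neg hne2]
    congr 1
    rw [← List.map_dropLast]
    have hms : (parts.tail.dropLast).map (List.map pvF) ≠ [] := by
      simp only [ne_eq, List.map_eq_nil_iff]; exact hmsne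
    rw [pvFlat_dropLast _ hms]
    have hnomem : '_' ∉ List.intercalate ['.'] ((parts.tail.dropLast).map (List.map pvF)) := by
      rw [← pvFlat_dropLast _ hms]
      intro hmem
      have hmem2 := (List.dropLast_sublist _).mem hmem
      rw [List.mem_flatMap] at hmem2
      obtain ⟨x, hx, hmemx⟩ := hmem2
      rw [List.mem_map] at hx
      obtain ⟨seg, _, rfl⟩ := hx
      rw [List.mem_append] at hmemx
      rcases hmemx with hmemx | hmemx
      · rw [List.mem_map] at hmemx
        obtain ⟨c, _, hc⟩ := hmemx
        by_cases h : c = '_' <;> simp [pvF, h] at hc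
      · simp at hmemx
    rw [hdrop]
    have hmap : List.map (fun node => PySem.Chars.replace node ['_'] ['.']) parts.tail.dropLast
        = List.map (List.map pvF) parts.tail.dropLast := by
      simp [pvReplace_spec]
    rw [hmap, PySem.Chars.join, pvStrip_id _ hnomem]

-- ===== VERDICT (by name: the statement is the Claim_ definition above) =====
theorem extract_key_from_fx_node_py_spec : Claim_equal_extract_key_from_fx_node_py := by
  intro fx_node _
  unfold Spec_extract_key_from_fx_node_py
  exact pvFinal fx_node
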